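-- pv_equiv track=rewrite | github.com/pypi-data/pypi-mirror-333 | packages/leettools/leettools-1.0.17-py3-none-any.whl/leettools/eds/pipeline/convert/_impl/parser_html.py | _filter_and_group_paragraphs_with_headings
-- ===== SOURCE A (Python) =====
-- def _filter_and_group_paragraphs_with_headings(text: str) -> str:
--     """
--     Filters the meaningful paragraphs and groups them with headings.
--
--     Args:
--         text: The text content to be filtered and grouped.
--
--     Returns:
--         The meaningful paragraphs grouped with headings.
--     """
--     lines = text.split("\n")
--     paragraphs = []
--     current_paragraph = []
--     paragraph_number = 0  # To keep track of paragraph numbering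
--
--     for line in lines:
--         if (
--             # TODO: This logic needs to be improved
--             len(line.split())
--             > 3
--         ):  # Consider lines with more than 3 words as meaningful
--             current_paragraph.append(line)
--         elif current_paragraph:
--             # Join the lines in the current paragraph
--             joined_paragraph = " ".join(current_paragraph)
--             if paragraph_number == 0:  # First paragraph as the title
--                 paragraphs.append(f"# {joined_paragraph}")
--                 paragraphs.append("## Content")
--             else:  # Numbered headings for subsequent paragraphs
--                 paragraphs.append(f"{joined_paragraph}")
--             paragraph_number += 1
--             current_paragraph = (
--                 []
--             )  # Start a new paragraph for the next set of meaningful lines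
--
--     # Ensure the last paragraph is added if it wasn't ended by a short line
--     if current_paragraph:
--         joined_paragraph = " ".join(current_paragraph)
--         if paragraph_number == 0:
--             paragraphs.append(f"# {joined_paragraph}")
--             paragraphs.append("## Content")
--         else:
--             paragraphs.append(f"{joined_paragraph}")
--
--     return "\n\n".join(paragraphs)
-- ===== SOURCE B (Python) =====
-- def _filter_and_group_paragraphs_with_headings(text: str) -> str:
--     # Boundary-index algorithm: compute the mask of meaningful lines, find the
--     # indices where the mask flips, slice the line list at those boundaries,
--     # and keep the slices whose mask is True; then format by list construction.
--     lines = text.split("\n")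
--     mask = [len(line.split()) > 3 for line in lines]
--     n = len(lines)
--     bounds = [0] + [i for i in range(1, n) if mask[i] != mask[i - 1]] + [n]
--     runs = [
--         " ".join(lines[a:b])
--         for a, b in zip(bounds, bounds[1:])
--         if mask[a]
--     ]
--     if not runs:
--         return ""
--     return "\n\n".join([f"# {runs[0]}", "## Content"] + runs[1:])
-- ===== Notes on version B (the rewrite author's own statement) =====
-- stated objective: alternative
-- what changed: Replaced A's single accumulator pass with flush state and a duplicated tail flush by a boundary-index algorithm: compute the per-line meaningfulness mask, list the indices where the mask flips, slice the line list between consecutive boundaries, keep the True-masked slices, and format by list construction (no paragraph counter).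
import Mathlib
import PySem

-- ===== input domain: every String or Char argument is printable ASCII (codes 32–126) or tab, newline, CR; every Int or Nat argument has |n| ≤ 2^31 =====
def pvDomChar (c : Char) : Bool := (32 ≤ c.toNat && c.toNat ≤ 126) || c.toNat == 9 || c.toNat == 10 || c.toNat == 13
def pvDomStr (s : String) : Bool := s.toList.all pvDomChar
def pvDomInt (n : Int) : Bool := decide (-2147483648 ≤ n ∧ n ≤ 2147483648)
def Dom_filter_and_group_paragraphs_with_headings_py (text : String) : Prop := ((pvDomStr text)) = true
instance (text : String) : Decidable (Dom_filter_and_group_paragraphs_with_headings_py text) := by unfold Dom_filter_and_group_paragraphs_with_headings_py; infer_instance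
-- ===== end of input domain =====

-- B replaces A's single accumulator pass with flush state (and a duplicated tail flush) by a
-- boundary-index algorithm: compute the mask of meaningful lines, find the indices where the
-- mask flips, slice the line list at those boundaries and keep the True slices; same cost.

-- shared by both ports: Python's `len(line.split()) > 3`
def pvMeaningful (line : String) : Bool := decide (3 < (PySem.Str.split₀ line).length)

-- ===== PORT A =====
-- loop state: (paragraphs, current_paragraph, paragraph_number)
def pvStepA (st : List String × List String × Int) (line : String) :
    List String × List String × Int :=
  let (paras, cur, n) := st
  if pvMeaningful line then (paras, cur ++ [line], n)
  else if cur.isEmpty then (paras, cur, n)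
  else
    let j := PySem.Str.join " " cur
    if n == 0 then (paras ++ ["# " ++ j, "## Content"], [], n + 1)
    else (paras ++ [j], [], n + 1)

def filter_and_group_paragraphs_with_headings_py (text : String) : String :=
  let lines := (PySem.Str.split? text "\n").getD []
  let st := lines.foldl pvStepA ([], [], 0)
  let (paras, cur, n) := st
  let paras :=
    if cur.isEmpty then paras
    else
      let j := PySem.Str.join " " cur
      if n == 0 then paras ++ ["# " ++ j, "## Content"] else paras ++ [j]
  PySem.Str.join "\n\n" paras

-- ===== PORT B =====
-- the comprehension filter `mask[i] != mask[i-1]` (Python indices here are nonnegative;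
-- out-of-range getD never fires on the indices Python uses)
def pvMaskNe (mask : List Bool) (i : Nat) : Bool :=
  decide (0 < i) && (mask.getD i false != mask.getD (i - 1) false)

-- `[i for i in range(1, n) if mask[i] != mask[i-1]]`; range(1,n) is the elements of range(n)
-- that pass `0 < i`, folded into the same filter
def pvTrans (mask : List Bool) : List Nat :=
  (List.range mask.length).filter (pvMaskNe mask)

-- `bounds = [0] + transitions + [n]`
def pvBoundsB (mask : List Bool) : List Nat :=
  [0] ++ pvTrans mask ++ [mask.length]

-- `[" ".join(lines[a:b]) for a, b in zip(bounds, bounds[1:]) if mask[a]]`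
-- (lines[a:b] with 0 ≤ a ≤ b is (drop a).take (b-a), exact for these nonnegative indices)
def pvExtract (lines : List String) (mask : List Bool) (bounds : List Nat) : List String :=
  (bounds.zip bounds.tail).filterMap fun ab =>
    if mask.getD ab.1 false then
      some (PySem.Str.join " " ((lines.drop ab.1).take (ab.2 - ab.1)))
    else none

def pvRunsB (lines : List String) : List String :=
  let mask := lines.map pvMeaningful
  pvExtract lines mask (pvBoundsB mask)

def filter_and_group_paragraphs_with_headings_py_alt (text : String) : String :=
  let lines := (PySem.Str.split? text "\n").getD []
  match pvRunsB lines with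
  | [] => ""
  | r0 :: rest => PySem.Str.join "\n\n" (("# " ++ r0) :: "## Content" :: rest)

-- ===== PRECONDITION & SPEC =====
def Spec_filter_and_group_paragraphs_with_headings_py (text : String) (out : String) : Prop := out = filter_and_group_paragraphs_with_headings_py_alt text
instance (text : String) (out : String) : Decidable (Spec_filter_and_group_paragraphs_with_headings_py text out) := by unfold Spec_filter_and_group_paragraphs_with_headings_py; infer_instance

-- ===== CLAIM (what is proved, stated in full; the proofs are below) =====
def Claim_equal_filter_and_group_paragraphs_with_headings_py : Prop := ∀ (text : String), Dom_filter_and_group_paragraphs_with_headings_py text → Spec_filter_and_group_paragraphs_with_headings_py text (filter_and_group_paragraphs_with_headings_py text)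

-- ===== LEMMAS AND PROOFS =====

-- proof-side: the maximal runs of meaningful lines (groupby-style recursion)
def pvRunsTrue (ls : List String) : List (List String) :=
  match ls with
  | [] => []
  | x :: xs =>
    if pvMeaningful x then (x :: xs.takeWhile pvMeaningful) :: pvRunsTrue (xs.dropWhile pvMeaningful)
    else pvRunsTrue xs
termination_by ls.length
decreasing_by
  · exact Nat.lt_succ_of_le (List.length_dropWhile_le pvMeaningful xs)
  · exact Nat.lt_succ_self _

-- proof-side: A's loop at the run level (current run accumulated in `cur`)
def pvRunsWith (cur : List String) (ls : List String) : List (List String) :=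
  match ls with
  | [] => if cur.isEmpty then [] else [cur]
  | x :: xs =>
    if pvMeaningful x then pvRunsWith (cur ++ [x]) xs
    else if cur.isEmpty then pvRunsWith [] xs
    else cur :: pvRunsWith [] xs

-- proof-side: the formatted block of one run / of a list of runs starting at index n
def pvBlock (n : Int) (g : List String) : List String :=
  let j := PySem.Str.join " " g
  if n == 0 then ["# " ++ j, "## Content"] else [j]

def pvFmtFrom (n : Int) (gs : List (List String)) : List String :=
  match gs with
  | [] => []
  | g :: gs => pvBlock n g ++ pvFmtFrom (n + 1) gs

lemma pvRunsWith_spec (ls : List String) :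
    pvRunsWith [] ls = pvRunsTrue ls ∧
    ∀ cur : List String, ¬ cur.isEmpty →
      pvRunsWith cur ls =
        (cur ++ ls.takeWhile pvMeaningful) :: pvRunsTrue (ls.dropWhile pvMeaningful) := by
  induction ls with
  | nil =>
    refine ⟨by simp [pvRunsWith, pvRunsTrue], fun cur hc => ?_⟩
    simp [pvRunsWith, pvRunsTrue, hc]
  | cons x xs ih =>
    by_cases hx : pvMeaningful x
    · refine ⟨?_, fun cur hc => ?_⟩
      · rw [show pvRunsWith [] (x :: xs) = pvRunsWith ([] ++ [x]) xs by simp [pvRunsWith, hx]]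
        simp only [List.nil_append]
        rw [ih.2 [x] (by simp)]
        rw [pvRunsTrue]
        simp [hx]
      · rw [show pvRunsWith cur (x :: xs) = pvRunsWith (cur ++ [x]) xs by
              simp [pvRunsWith, hx]]
        rw [ih.2 (cur ++ [x]) (by simp)]
        simp [hx, List.append_assoc]
    · refine ⟨?_, fun cur hc => ?_⟩
      · rw [show pvRunsWith [] (x :: xs) = pvRunsWith [] xs by simp [pvRunsWith, hx]]
        rw [ih.1, pvRunsTrue]
        simp [hx]
      · rw [show pvRunsWith cur (x :: xs) = cur :: pvRunsWith [] xs by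
              simp [pvRunsWith, hx, hc]]
        rw [ih.1]
        rw [show List.dropWhile pvMeaningful (x :: xs) = x :: xs by simp [hx]]
        rw [show List.takeWhile pvMeaningful (x :: xs) = [] by simp [hx]]
        rw [show pvRunsTrue (x :: xs) = pvRunsTrue xs by rw [pvRunsTrue]; simp [hx]]
        simp

-- final flush of A's state
def pvFlushA (st : List String × List String × Int) : List String :=
  let (paras, cur, n) := st
  if cur.isEmpty then paras
  else
    let j := PySem.Str.join " " cur
    if n == 0 then paras ++ ["# " ++ j, "## Content"] else paras ++ [j]

lemma pvLoopA_eq (lines : List String) :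
    ∀ (paras cur : List String) (n : Int),
      pvFlushA (lines.foldl pvStepA (paras, cur, n)) = paras ++ pvFmtFrom n (pvRunsWith cur lines) := by
  induction lines with
  | nil =>
    intro paras cur n
    by_cases hc : cur.isEmpty
    · simp [pvFlushA, pvRunsWith, pvFmtFrom, hc]
    · simp [pvFlushA, pvRunsWith, pvFmtFrom, pvBlock, hc]
      by_cases hn : n = 0 <;> simp [hn]
  | cons x xs ih =>
    intro paras cur n
    by_cases hx : pvMeaningful x
    · simp only [List.foldl_cons, pvStepA, hx, if_true]
      rw [ih]
      simp [pvRunsWith, hx]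
    · by_cases hc : cur.isEmpty
      · simp only [List.foldl_cons, pvStepA, hx, if_false, hc, if_true, Bool.false_eq_true]
        rw [ih]
        have hcur : cur = [] := by simpa using hc
        simp [pvRunsWith, hx, hcur]
      · by_cases hn : n == 0
        · simp only [List.foldl_cons, pvStepA, hx, Bool.false_eq_true, if_false, hc, hn, if_true]
          rw [ih]
          simp [pvRunsWith, hx, hc, pvFmtFrom, pvBlock, hn, List.append_assoc]
        · simp only [List.foldl_cons, pvStepA, hx, Bool.false_eq_true, if_false, hc, hn]
          rw [ih]
          simp [pvRunsWith, hx, hc, pvFmtFrom, pvBlock, hn, List.append_assoc]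

-- B-side lemmas

lemma pvFmtFrom_pos (gs : List (List String)) :
    ∀ n : Int, 1 ≤ n → pvFmtFrom n gs = gs.map (PySem.Str.join " ") := by
  induction gs with
  | nil => intro n _; simp [pvFmtFrom]
  | cons g gs ih =>
    intro n hn
    have hn0 : ¬ (n == 0) = true := by simp; omega
    rw [pvFmtFrom, ih (n + 1) (by omega)]
    simp [pvBlock, hn0]

lemma pvGetD_shift (m1 m2 : List Bool) (i : Nat) :
    (m1 ++ m2).getD (m1.length + i) false = m2.getD i false := by
  rw [List.getD_append_right _ _ _ _ (Nat.le_add_right _ _)]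
  simp

lemma pvDrop_shift (c r : List String) (a : Nat) :
    (c ++ r).drop (c.length + a) = r.drop a := by
  induction c with
  | nil => simp
  | cons y ys ih => simpa [Nat.succ_add] using ih

lemma pvGetD_repl (m i : Nat) (k : Bool) (h : i < m) :
    (List.replicate m k).getD i false = k := by
  simp [List.getD_eq_getElem?_getD, List.getElem?_replicate, h]

lemma pvTrans_replicate (m : Nat) (k : Bool) : pvTrans (List.replicate m k) = [] := by
  unfold pvTrans
  rw [List.filter_eq_nil_iff]
  intro i hi
  rw [List.length_replicate, List.mem_range] at hi
  unfold pvMaskNe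
  rcases Nat.eq_zero_or_pos i with h0 | h0
  · simp [h0]
  · rw [pvGetD_repl m i k hi, pvGetD_repl m (i - 1) k (by omega)]
    simp

lemma pvTrans_append (m : Nat) (k : Bool) (mr : List Bool) (hm : 1 ≤ m)
    (hne : mr ≠ []) (hr0 : mr.getD 0 false = !k) :
    pvTrans (List.replicate m k ++ mr) = m :: (pvTrans mr).map (m + ·) := by
  obtain ⟨s, hs⟩ : ∃ s, mr.length = s + 1 := by
    cases mr with
    | nil => exact absurd rfl hne
    | cons b bs => exact ⟨bs.length, rfl⟩
  have hL : ∀ i, i < m → (List.replicate m k ++ mr).getD i false = k := by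
    intro i hi
    rw [List.getD_append _ _ _ _ (by simpa using hi), pvGetD_repl m i k hi]
  have hR : ∀ i, (List.replicate m k ++ mr).getD (m + i) false = mr.getD i false := by
    intro i
    have := List.getD_append_right (List.replicate m k) mr false (m + i) (by simp)
    simpa using this
  unfold pvTrans
  rw [List.length_append, List.length_replicate, hs, List.range_add, List.filter_append]
  have h1 : (List.range m).filter (pvMaskNe (List.replicate m k ++ mr)) = [] := by
    rw [List.filter_eq_nil_iff]
    intro i hi
    rw [List.mem_range] at hi
    unfold pvMaskNe
    rcases Nat.eq_zero_or_pos i with h0 | h0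
    · simp [h0]
    · rw [hL i hi, hL (i - 1) (by omega)]
      simp
  rw [h1, List.nil_append, List.filter_map, List.range_succ_eq_map]
  have hzero : (pvMaskNe (List.replicate m k ++ mr) ∘ (m + ·)) 0 = true := by
    simp only [Function.comp_apply, Nat.add_zero]
    unfold pvMaskNe
    have e1 : (List.replicate m k ++ mr).getD m false = !k := by
      have := hR 0; rw [Nat.add_zero] at this; rw [this, hr0]
    rw [e1, hL (m - 1) (by omega)]
    simp [hm]
    omega
  have hcond : ∀ j, (pvMaskNe (List.replicate m k ++ mr) ∘ (m + ·)) (j + 1) = pvMaskNe mr (j + 1) := by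
    intro j
    simp only [Function.comp_apply]
    unfold pvMaskNe
    have e1 : (List.replicate m k ++ mr).getD (m + (j + 1)) false = mr.getD (j + 1) false := hR (j + 1)
    have e2 : (List.replicate m k ++ mr).getD (m + (j + 1) - 1) false = mr.getD j false := by
      rw [show m + (j + 1) - 1 = m + j by omega]; exact hR j
    rw [e1, e2]
    simp
  have hmr0 : pvMaskNe mr 0 = false := by unfold pvMaskNe; simp
  rw [List.filter_cons_of_pos hzero]
  rw [List.filter_map]
  have hcongr : (List.range s).filter ((pvMaskNe (List.replicate m k ++ mr) ∘ (m + ·)) ∘ Nat.succ)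
      = (List.range s).filter (pvMaskNe mr ∘ Nat.succ) := by
    apply List.filter_congr
    intro j _
    simpa using hcond j
  rw [hcongr, List.filter_cons_of_neg (by simp [hmr0]), List.filter_map]
  simp [Function.comp]

lemma pvExtract_nil (lines : List String) (mask : List Bool) :
    pvExtract lines mask [] = [] := by
  simp [pvExtract]

lemma pvExtract_single (lines : List String) (mask : List Bool) (a : Nat) :
    pvExtract lines mask [a] = [] := by
  simp [pvExtract]

lemma pvExtract_cons (lines : List String) (mask : List Bool) (a b : Nat) (rest : List Nat) :
    pvExtract lines mask (a :: b :: rest) =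
      (if mask.getD a false then [PySem.Str.join " " ((lines.drop a).take (b - a))] else [])
        ++ pvExtract lines mask (b :: rest) := by
  unfold pvExtract
  rw [List.tail_cons, List.zip_cons_cons, List.filterMap_cons]
  by_cases h : mask[a]?.getD false <;> simp [h]

lemma pvExtract_shift (c r : List String) (mc mr : List Bool) (hmc : mc.length = c.length) :
    ∀ bs : List Nat, pvExtract (c ++ r) (mc ++ mr) (bs.map (c.length + ·)) = pvExtract r mr bs := by
  intro bs
  induction bs with
  | nil => simp [pvExtract_nil]
  | cons a bs ih =>
    cases bs with
    | nil => simp [pvExtract_single]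
    | cons b bs' =>
      rw [List.map_cons, List.map_cons, pvExtract_cons, pvExtract_cons]
      rw [show List.map (c.length + ·) (b :: bs') = (c.length + b) :: List.map (c.length + ·) bs' from rfl] at ih
      rw [ih]
      congr 1
      have h1 : (mc ++ mr).getD (c.length + a) false = mr.getD a false := by
        rw [← hmc]; exact pvGetD_shift mc mr a
      have h2 : (c ++ r).drop (c.length + a) = r.drop a := pvDrop_shift c r a
      have h3 : c.length + b - (c.length + a) = b - a := by omega
      rw [h1, h2, h3]

lemma pvTwDw_append (p : String → Bool) (a b : List String) (ha : ∀ y ∈ a, p y = true) :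
    (a ++ b).takeWhile p = a ++ b.takeWhile p ∧ (a ++ b).dropWhile p = b.dropWhile p := by
  induction a with
  | nil => simp
  | cons x xs ih =>
    have hx := ha x (by simp)
    have ih' := ih (fun y hy => ha y (by simp [hy]))
    refine ⟨?_, ?_⟩
    · rw [List.cons_append, List.takeWhile_cons, if_pos hx, ih'.1, List.cons_append]
    · rw [List.cons_append, List.dropWhile_cons, if_pos hx, ih'.2]

lemma pvDropWhile_head_false (p : String → Bool) (l : List String) (x : String) (t : List String)
    (h : l.dropWhile p = x :: t) : p x = false := by
  induction l with
  | nil => simp at h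
  | cons a as ih =>
    rw [List.dropWhile_cons] at h
    by_cases hp : p a
    · exact ih (by simpa [hp] using h)
    · rw [if_neg (by simp [hp])] at h
      cases h
      simpa using hp

lemma pvRunsTrue_nil : pvRunsTrue [] = [] := by rw [pvRunsTrue]

lemma pvRunsTrue_false_prefix (c r : List String) (h : ∀ y ∈ c, pvMeaningful y = false) :
    pvRunsTrue (c ++ r) = pvRunsTrue r := by
  induction c with
  | nil => rfl
  | cons x xs ih =>
    rw [List.cons_append, pvRunsTrue, if_neg (by simp [h x (by simp)])]
    exact ih (fun y hy => h y (by simp [hy]))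

-- one chunk step: a maximal constant-key block c = x :: tw followed by the rest r
lemma pvRunsB_chunk (x : String) (tw r : List String)
    (htw : ∀ y ∈ tw, pvMeaningful y = pvMeaningful x)
    (hhd : ∀ hh ∈ r.head?, pvMeaningful hh = !(pvMeaningful x))
    (IH : pvRunsB r = (pvRunsTrue r).map (PySem.Str.join " ")) :
    pvRunsB ((x :: tw) ++ r) = (pvRunsTrue ((x :: tw) ++ r)).map (PySem.Str.join " ") := by
  have hconst : ∀ y ∈ (x :: tw), pvMeaningful y = pvMeaningful x := by
    intro y hy
    rcases List.mem_cons.mp hy with h | h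
    · subst h; rfl
    · exact htw y h
  have hm1 : 1 ≤ (x :: tw).length := by simp
  have hmc : (x :: tw).map pvMeaningful = List.replicate (x :: tw).length (pvMeaningful x) := by
    have h1 : ∀ b ∈ (x :: tw).map pvMeaningful, b = pvMeaningful x := by
      intro b hb
      rcases List.mem_map.mp hb with ⟨y, hy, rfl⟩
      exact hconst y hy
    have := List.eq_replicate_of_mem h1
    simpa using this
  cases hrr : r with
  | nil =>
    subst hrr
    rw [List.append_nil]
    have hLHS : pvRunsB (x :: tw) =
        if pvMeaningful x then [PySem.Str.join " " (x :: tw)] else [] := by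
      show pvExtract (x :: tw) ((x :: tw).map pvMeaningful)
          (pvBoundsB ((x :: tw).map pvMeaningful)) = _
      rw [hmc]
      unfold pvBoundsB
      rw [pvTrans_replicate, List.length_replicate]
      rw [show ([0] ++ [] ++ [(x :: tw).length] : List Nat) = 0 :: (x :: tw).length :: [] from rfl]
      rw [pvExtract_cons, pvExtract_single, List.append_nil]
      rw [pvGetD_repl _ 0 _ hm1]
      rw [List.drop_zero, Nat.sub_zero, List.take_length]
    by_cases hk : pvMeaningful x = true
    · have htake : tw.takeWhile pvMeaningful = tw := by
        have := (pvTwDw_append pvMeaningful tw [] (fun y hy => by rw [htw y hy, hk])).1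
        simpa using this
      have hdrop : tw.dropWhile pvMeaningful = [] := by
        have := (pvTwDw_append pvMeaningful tw [] (fun y hy => by rw [htw y hy, hk])).2
        simpa using this
      have hRT : pvRunsTrue (x :: tw) = [x :: tw] := by
        rw [pvRunsTrue, if_pos hk, htake, hdrop, pvRunsTrue_nil]
      rw [hLHS, hRT, if_pos hk]
      simp
    · have hRT : pvRunsTrue (x :: tw) = [] := by
        have := pvRunsTrue_false_prefix (x :: tw) []
          (fun y hy => by rw [hconst y hy]; simpa using hk)
        simpa [pvRunsTrue_nil] using this
      rw [hLHS, hRT, if_neg hk]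
      simp
  | cons hh tt =>
    rw [← hrr]
    have hfh : pvMeaningful hh = !(pvMeaningful x) := hhd hh (by rw [hrr]; rfl)
    have hrne : r.map pvMeaningful ≠ [] := by rw [hrr]; simp
    have hget0 : (r.map pvMeaningful).getD 0 false = !(pvMeaningful x) := by
      rw [hrr]; simpa using hfh
    have hbounds : pvBoundsB ((x :: tw).map pvMeaningful ++ r.map pvMeaningful) =
        0 :: (pvBoundsB (r.map pvMeaningful)).map ((x :: tw).length + ·) := by
      rw [hmc]
      unfold pvBoundsB
      rw [pvTrans_append (x :: tw).length (pvMeaningful x) (r.map pvMeaningful) hm1 hrne hget0]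
      simp [List.length_append]
    have hbsm : (pvBoundsB (r.map pvMeaningful)).map ((x :: tw).length + ·) =
        (x :: tw).length :: ((pvTrans (r.map pvMeaningful) ++ [(r.map pvMeaningful).length]).map ((x :: tw).length + ·)) := by
      unfold pvBoundsB; simp
    have hshift := pvExtract_shift (x :: tw) r (List.replicate (x :: tw).length (pvMeaningful x))
      (r.map pvMeaningful) (by simp) (pvBoundsB (r.map pvMeaningful))
    have hL : pvRunsB ((x :: tw) ++ r) =
        (if pvMeaningful x then [PySem.Str.join " " (x :: tw)] else [])
          ++ (pvRunsTrue r).map (PySem.Str.join " ") := by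
      show pvExtract ((x :: tw) ++ r) (((x :: tw) ++ r).map pvMeaningful)
          (pvBoundsB (((x :: tw) ++ r).map pvMeaningful)) = _
      rw [List.map_append, hbounds]
      conv_lhs => rw [hbsm]
      rw [pvExtract_cons]
      rw [← hbsm]
      rw [hmc, hshift]
      have hpvr : pvExtract r (r.map pvMeaningful) (pvBoundsB (r.map pvMeaningful)) = pvRunsB r := rfl
      rw [hpvr, IH]
      congr 1
      rw [List.getD_append _ _ _ _ (by simpa using hm1)]
      rw [pvGetD_repl _ 0 _ hm1]
      rw [List.drop_zero, Nat.sub_zero]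
      rw [List.take_left]
    by_cases hk : pvMeaningful x = true
    · have hall : ∀ y ∈ tw, pvMeaningful y = true := fun y hy => by rw [htw y hy, hk]
      have htwr := pvTwDw_append pvMeaningful tw r hall
      have htr : r.takeWhile pvMeaningful = [] := by
        rw [hrr, List.takeWhile_cons, if_neg (by rw [hfh, hk]; simp)]
      have hdr : r.dropWhile pvMeaningful = r := by
        rw [hrr, List.dropWhile_cons, if_neg (by rw [hfh, hk]; simp)]
      have hRT : pvRunsTrue ((x :: tw) ++ r) = (x :: tw) :: pvRunsTrue r := by
        rw [List.cons_append, pvRunsTrue, if_pos hk, htwr.1, htwr.2, htr, hdr, List.append_nil]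
      rw [hL, hRT, if_pos hk]
      simp
    · have hRT : pvRunsTrue ((x :: tw) ++ r) = pvRunsTrue r := by
        exact pvRunsTrue_false_prefix (x :: tw) r
          (fun y hy => by rw [hconst y hy]; simpa using hk)
      rw [hL, hRT, if_neg hk]
      simp

lemma pvRunsB_eq_aux : ∀ (N : Nat) (ls : List String), ls.length ≤ N →
    pvRunsB ls = (pvRunsTrue ls).map (PySem.Str.join " ") := by
  intro N
  induction N with
  | zero =>
    intro ls hls
    have h0 : ls = [] := by
      cases ls with
      | nil => rfl
      | cons a as => simp at hls
    subst h0
    rw [pvRunsTrue_nil]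
    rfl
  | succ N ih =>
    intro ls hls
    cases ls with
    | nil => rw [pvRunsTrue_nil]; rfl
    | cons x xs =>
      have hcr : (x :: xs.takeWhile (fun y => pvMeaningful y == pvMeaningful x)) ++
          xs.dropWhile (fun y => pvMeaningful y == pvMeaningful x) = x :: xs := by
        rw [List.cons_append, List.takeWhile_append_dropWhile]
      rw [← hcr]
      apply pvRunsB_chunk
      · intro y hy
        have := List.mem_takeWhile_imp hy
        simpa using this
      · intro hh hhh
        cases hdw : xs.dropWhile (fun y => pvMeaningful y == pvMeaningful x) with
        | nil => rw [hdw] at hhh; simp at hhh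
        | cons z zs =>
          rw [hdw] at hhh
          have hz : z = hh := by simpa using hhh
          have hfalse := pvDropWhile_head_false (fun y => pvMeaningful y == pvMeaningful x) xs z zs hdw
          rw [← hz]
          cases hb : pvMeaningful z <;> cases hc : pvMeaningful x <;> simp_all
      · apply ih
        have h1 := List.length_dropWhile_le (fun y => pvMeaningful y == pvMeaningful x) xs
        have h2 : xs.length ≤ N := by simpa using Nat.le_of_succ_le_succ hls
        omega

lemma pvRunsB_eq (ls : List String) :
    pvRunsB ls = (pvRunsTrue ls).map (PySem.Str.join " ") :=
  pvRunsB_eq_aux ls.length ls le_rfl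

-- ===== VERDICT (by name: the statement is the Claim_ definition above) =====
theorem filter_and_group_paragraphs_with_headings_py_spec : Claim_equal_filter_and_group_paragraphs_with_headings_py := by
  intro text _
  show filter_and_group_paragraphs_with_headings_py text = filter_and_group_paragraphs_with_headings_py_alt text
  have h := pvLoopA_eq ((PySem.Str.split? text "\n").getD []) [] [] 0
  rw [(pvRunsWith_spec ((PySem.Str.split? text "\n").getD [])).1] at h
  show PySem.Str.join "\n\n"
      (pvFlushA (List.foldl pvStepA ([], [], 0) ((PySem.Str.split? text "\n").getD []))) =
    filter_and_group_paragraphs_with_headings_py_alt text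
  rw [h, List.nil_append]
  have halt : filter_and_group_paragraphs_with_headings_py_alt text =
      (match pvRunsB ((PySem.Str.split? text "\n").getD []) with
       | [] => ""
       | r0 :: rest => PySem.Str.join "\n\n" (("# " ++ r0) :: "## Content" :: rest)) := rfl
  rw [halt, pvRunsB_eq]
  cases hg : pvRunsTrue ((PySem.Str.split? text "\n").getD []) with
  | nil => simp [pvFmtFrom, PySem.Str.join]
  | cons g gs =>
    simp only [List.map_cons]
    rw [pvFmtFrom, show (0:Int) + 1 = 1 from rfl, pvFmtFrom_pos gs 1 le_rfl]
    simp [pvBlock]
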